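-- pv_equiv track=rewrite | github.com/text2phenotype/biomed | biomed/tests/experiment/doc_type/release_point_df_out.py | get_ordered_cols
-- ===== SOURCE A (Python) =====
-- ORDERED_COLUMNS = ['file', 'text', 'preferredText', 'label', 'score', 'range', 'code', 'cui', 'tui', 'vocab']
--
-- EXLUDED_COLS = ['polarity']
--
-- def get_ordered_cols(df_cols):
--     out_order = [None] * len(ORDERED_COLUMNS)
--     for df_col in df_cols:
--         if df_col in EXLUDED_COLS:
--             continue
--         elif df_col in ORDERED_COLUMNS:
--             out_order[ORDERED_COLUMNS.index(df_col)] = df_col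
--         else:
--             out_order.append(df_col)
--     return [a for a in out_order if a is  not None]
-- ===== SOURCE B (Python) =====
-- ORDERED_COLUMNS = ['file', 'text', 'preferredText', 'label', 'score', 'range', 'code', 'cui', 'tui', 'vocab']
--
-- EXLUDED_COLS = ['polarity']
--
-- def get_ordered_cols(df_cols):
--     cols = list(df_cols)
--     known = [c for c in ORDERED_COLUMNS if c in cols and c not in EXLUDED_COLS]
--     extra = [c for c in cols if c not in ORDERED_COLUMNS and c not in EXLUDED_COLS]
--     return known + extra
-- ===== Notes on version B (the rewrite author's own statement) =====
-- stated objective: simpler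
-- what changed: Replaces the None-slot array with its index-based placement and final compaction by two direct filters: recognized columns taken in canonical order, then unrecognized columns in dataframe order.
import Mathlib
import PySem

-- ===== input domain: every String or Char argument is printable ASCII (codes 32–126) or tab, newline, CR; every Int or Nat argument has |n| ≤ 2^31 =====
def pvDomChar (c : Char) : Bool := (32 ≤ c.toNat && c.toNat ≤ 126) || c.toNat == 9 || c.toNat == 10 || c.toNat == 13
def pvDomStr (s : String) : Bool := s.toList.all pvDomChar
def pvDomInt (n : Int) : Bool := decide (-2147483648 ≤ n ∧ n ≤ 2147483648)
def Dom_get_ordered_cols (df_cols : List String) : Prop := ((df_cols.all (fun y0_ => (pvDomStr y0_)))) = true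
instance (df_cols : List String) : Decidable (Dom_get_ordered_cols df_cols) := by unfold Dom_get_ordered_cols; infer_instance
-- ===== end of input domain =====

-- B replaces A's None-slot array, index placement and final compaction by two direct
-- filters (recognized columns in canonical order, then the rest in input order): simpler, same values.

def pvORD : List String := ["file", "text", "preferredText", "label", "score", "range", "code", "cui", "tui", "vocab"]

def pvEXC : List String := ["polarity"]

-- ===== PORT A =====
-- loop body of A: skip excluded, place known at its canonical index, append unknown
def pvStepA (acc : List (Option String)) (c : String) : List (Option String) :=
  if pvEXC.contains c then acc
  else if pvORD.contains c then acc.set (pvORD.idxOf c) (some c)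
  else acc ++ [some c]

def get_ordered_cols (df_cols : List String) : List String :=
  (df_cols.foldl pvStepA (List.replicate pvORD.length none)).filterMap id

-- ===== PORT B =====
def get_ordered_cols_alt (df_cols : List String) : List String :=
  (pvORD.filter (fun c => df_cols.contains c && !pvEXC.contains c))
  ++ (df_cols.filter (fun c => !pvORD.contains c && !pvEXC.contains c))

-- ===== PRECONDITION & SPEC =====
def Spec_get_ordered_cols (df_cols : List String) (out : List String) : Prop := out = get_ordered_cols_alt df_cols
instance (df_cols : List String) (out : List String) : Decidable (Spec_get_ordered_cols df_cols out) := by unfold Spec_get_ordered_cols; infer_instance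

-- ===== CLAIM (what is proved, stated in full; the proofs are below) =====
def Claim_equal_get_ordered_cols : Prop := ∀ (df_cols : List String), Dom_get_ordered_cols df_cols → Spec_get_ordered_cols df_cols (get_ordered_cols df_cols)

-- ===== LEMMAS AND PROOFS =====

-- the canonical slots after processing the columns p
def pvSlots (p : List String) : List (Option String) :=
  pvORD.map (fun o => if p.contains o then some o else none)

-- the appended unknown columns after processing p
def pvTail (p : List String) : List (Option String) :=
  (p.filter (fun c => !pvORD.contains c && !pvEXC.contains c)).map some

theorem pvStep_inv (p : List String) (c : String) :
    pvStepA (pvSlots p ++ pvTail p) c = pvSlots (p ++ [c]) ++ pvTail (p ++ [c]) := by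
  by_cases hex : pvEXC.contains c = true
  · -- c = "polarity": nothing changes
    have hc : c = "polarity" := by simpa [pvEXC] using hex
    subst hc
    simp [pvStepA, pvSlots, pvTail, pvEXC, pvORD, List.filter_append]
  · have hexP : c ∉ pvEXC := fun h => hex (List.contains_iff_mem.mpr h)
    by_cases hord : pvORD.contains c = true
    · -- known column: set its canonical slot
      have hordP : c ∈ pvORD := List.contains_iff_mem.mp hord
      have hlen : (pvSlots p).length = pvORD.length := by simp [pvSlots]
      have hidx : pvORD.idxOf c < (pvSlots p).length := by
        rw [hlen]; exact List.idxOf_lt_length_of_mem hordP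
      have hset : (pvSlots p ++ pvTail p).set (pvORD.idxOf c) (some c)
          = (pvSlots p).set (pvORD.idxOf c) (some c) ++ pvTail p := by
        rw [List.set_append]; simp [hidx]
      have hslots : (pvSlots p).set (pvORD.idxOf c) (some c) = pvSlots (p ++ [c]) := by
        have hmem := hordP
        simp only [pvORD, List.mem_cons, List.not_mem_nil, or_false] at hmem
        rcases hmem with h|h|h|h|h|h|h|h|h|h <;> subst h <;>
          simp [pvSlots, pvORD, List.idxOf, List.findIdx, List.findIdx.go, List.set]
      have htail : pvTail (p ++ [c]) = pvTail p := by
        simp [pvTail, List.filter_append, hordP]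
      simp [pvStepA, hexP, hordP, hset, hslots, htail]
    · -- unknown column: appended at the end
      have hordP : c ∉ pvORD := fun h => hord (List.contains_iff_mem.mpr h)
      have hslots : pvSlots (p ++ [c]) = pvSlots p := by
        apply List.map_congr_left
        intro o ho
        have hoc : o ≠ c := by intro h; subst h; exact hordP ho
        simp [hoc]
      have htail : pvTail (p ++ [c]) = pvTail p ++ [some c] := by
        simp [pvTail, List.filter_append, hordP, hexP]
      simp [pvStepA, hexP, hordP, hslots, htail, List.append_assoc]

theorem pvLoop (l p : List String) :
    List.foldl pvStepA (pvSlots p ++ pvTail p) l = pvSlots (p ++ l) ++ pvTail (p ++ l) := by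
  induction l generalizing p with
  | nil => simp
  | cons c l ih =>
    rw [List.foldl_cons, pvStep_inv]
    have := ih (p ++ [c])
    simpa using this

theorem pvFilterMap_if (l : List String) (q : String → Bool) :
    (l.filterMap fun o => if q o then some o else none) = l.filter q := by
  induction l with
  | nil => rfl
  | cons a l ih =>
    by_cases h : q a = true <;> simp [h, ih]

theorem get_ordered_cols_spec : Claim_equal_get_ordered_cols := by
  intro df_cols _
  unfold Spec_get_ordered_cols
  have hinit : (List.replicate pvORD.length (none : Option String)) = pvSlots [] ++ pvTail [] := by
    simp [pvSlots, pvTail, pvORD]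
  have hloop := pvLoop df_cols []
  simp only [List.nil_append] at hloop
  rw [get_ordered_cols, hinit, hloop, List.filterMap_append]
  have hfst : (pvSlots df_cols).filterMap id
      = pvORD.filter (fun o => df_cols.contains o) := by
    rw [pvSlots, List.filterMap_map]
    simpa using pvFilterMap_if pvORD (fun o => df_cols.contains o)
  have hsnd : (pvTail df_cols).filterMap id
      = df_cols.filter (fun c => !pvORD.contains c && !pvEXC.contains c) := by
    simp [pvTail]
  rw [hfst, hsnd, get_ordered_cols_alt]
  congr 1
  apply List.filter_congr
  intro o ho
  have hoe : o ∉ pvEXC := by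
    simp only [pvORD, List.mem_cons, List.not_mem_nil, or_false] at ho
    rcases ho with h|h|h|h|h|h|h|h|h|h <;> subst h <;> decide
  simp [hoe]
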